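-- pv_equiv track=rewrite | github.com/madeibao/CTest | Huawei/单词接龙.py | result
-- ===== SOURCE A (Python) =====
-- def result(k, n, words):
--     chain = [words.pop(k)]
--     # 统计前缀。
--     prefix = {}
--     # 单词的第一个字母为key，然后加入列表中。
--     for word in words:
--         w = word[0]
--         if prefix.get(w) is None:
--             prefix[w] = []
--         prefix[w].append(word)
--     # 开始对表进行排序。存在多个首字母相同的单词时，取长度最长的单词，如果长度也相等，则取字典序最小的单词
--     for w in prefix.keys():
--         prefix[w].sort(key= lambda x: (-len(x), [ord(i) for i in x]))
--     # 开始循环。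
--     while True:
--         # 拿到chain的倒数第一个单词的最后一个字母。
--         tail = chain[-1][-1]
--         if prefix.get(tail):
--             # 存在，就要把prefix[tail]弹出第一个。因为题目说了单词不能重复使用。
--             chain.append(prefix[tail].pop(0))
--         else:
--             break
--     return "".join(chain)
-- ===== SOURCE B (Python) =====
-- def result(k, n, words):
--     # NOTE: like A, this pops words[k] from the caller's list (same mutation).
--     chain = [words.pop(k)]
--     rest = sorted(words, key=lambda w: (-len(w), w))
--     while True:
--         tail = chain[-1][-1]
--         for i, w in enumerate(rest):
--             if w.startswith(tail):
--                 chain.append(rest.pop(i))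
--                 break
--         else:
--             break
--     return "".join(chain)
-- ===== Notes on version B (the rewrite author's own statement) =====
-- stated objective: alternative
-- what changed: A groups words into a per-first-letter dict of buckets, sorts each bucket by (-len, [ord...]) and pops bucket heads; B instead sorts the remaining words once globally by (-len, word) and per step linearly scans that pool for the first word starting with the tail letter, removing it — one global sort plus scans, trading speed on long chains for a simpler single-pool structure.
import Mathlib
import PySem

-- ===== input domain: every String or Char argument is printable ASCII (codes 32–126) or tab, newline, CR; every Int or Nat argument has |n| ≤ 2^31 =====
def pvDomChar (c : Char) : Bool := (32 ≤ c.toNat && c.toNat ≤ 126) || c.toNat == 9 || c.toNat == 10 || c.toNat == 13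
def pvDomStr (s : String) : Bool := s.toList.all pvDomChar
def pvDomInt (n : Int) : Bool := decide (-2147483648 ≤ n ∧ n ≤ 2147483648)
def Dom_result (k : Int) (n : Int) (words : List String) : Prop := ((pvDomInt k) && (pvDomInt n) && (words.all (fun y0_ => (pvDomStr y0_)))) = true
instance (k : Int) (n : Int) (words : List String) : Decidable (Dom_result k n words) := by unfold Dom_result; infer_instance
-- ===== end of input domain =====

-- B replaces A's per-first-letter dict of individually sorted buckets by ONE global sort of the
-- remaining words plus a first-match scan per step (alternative decomposition, similar cost).
-- Like A, both Pythons pop words[k] from the caller's list (same mutation); the claim is about the return value.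

-- ===== PORT A =====
-- [ord(i) for i in x]
def ordK (x : String) : List Int := x.toList.map (fun c => (c.toNat : Int))

-- one iteration of A's dict-building loop (word[0] = none means Python raises IndexError; Pre_result excludes it)
def aStep (d : PySem.Dict Char (List String)) (word : String) : PySem.Dict Char (List String) :=
  match PySem.Str.pyGet? word 0 with
  | none => d
  | some c =>
      let d1 := if d.get? c = none then d.insert c [] else d
      d1.modify c [] (fun l => l ++ [word])

-- A's while loop; fuel is an upper bound on the number of iterations (rest.length + 1 always suffices)
def aLoop : Nat → PySem.Dict Char (List String) → List String → String
  | 0, _, chain => PySem.Str.join "" chain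
  | fuel+1, d, chain =>
    match PySem.List.pyGet? chain (-1) with
    | none => PySem.Str.join "" chain
    | some last =>
      match PySem.Str.pyGet? last (-1) with
      | none => PySem.Str.join "" chain   -- Python raises on a "" chain word; Pre_result excludes it
      | some tail =>
        match d.get? tail with
        | some (w :: ws) => aLoop fuel (d.insert tail ws) (chain ++ [w])
        | _ => PySem.Str.join "" chain

def result (k : Int) (n : Int) (words : List String) : String :=
  match PySem.List.pop? words k with
  | none => ""   -- words.pop(k) raises IndexError; Pre_result excludes it
  | some (start, rest) =>
      let d0 := rest.foldl aStep PySem.Dict.empty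
      let d1 := (PySem.Dict.keys d0).foldl
        (fun d c => d.modify c []
          (fun l => PySem.List.sorted2 l (fun x => -(PySem.Str.len x : Int)) ordK)) d0
      aLoop (rest.length + 1) d1 [start]

-- ===== PORT B =====
-- B's inner for/else: first word starting with t, and the list with that occurrence removed
def bScan (t : Char) : List String → Option (String × List String)
  | [] => none
  | w :: ws =>
    if PySem.Str.startswith w (String.ofList [t]) then some (w, ws)
    else match bScan t ws with
         | some (v, r) => some (v, w :: r)
         | none => none

def bLoop : Nat → List String → List String → String
  | 0, _, chain => PySem.Str.join "" chain
  | fuel+1, rest, chain =>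
    match PySem.List.pyGet? chain (-1) with
    | none => PySem.Str.join "" chain
    | some last =>
      match PySem.Str.pyGet? last (-1) with
      | none => PySem.Str.join "" chain   -- Python raises on a "" chain word; Pre_result excludes it
      | some tail =>
        match bScan tail rest with
        | some (w, rest') => bLoop fuel rest' (chain ++ [w])
        | none => PySem.Str.join "" chain

def result_alt (k : Int) (n : Int) (words : List String) : String :=
  match PySem.List.pop? words k with
  | none => ""   -- words.pop(k) raises IndexError; Pre_result excludes it
  | some (start, rest) =>
      bLoop (rest.length + 1)
        (PySem.List.sorted2 rest (fun w => -(PySem.Str.len w : Int)) (fun w => w)) [start]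

-- ===== PRECONDITION & SPEC =====
-- Pre_result excludes exactly the inputs where Python A raises: an out-of-range pop index k
-- (IndexError) and lists containing "" (IndexError on word[0] / chain[-1][-1]).
def Pre_result (k : Int) (n : Int) (words : List String) : Prop :=
  PySem.Raise.InRange words.length k ∧ ∀ w ∈ words, w ≠ ""
instance (k : Int) (n : Int) (words : List String) : Decidable (Pre_result k n words) := by
  unfold Pre_result; infer_instance

def pvWitness_result : Int × Int × List String := (0, 0, ["ab", "ba", "b"])

def Spec_result (k : Int) (n : Int) (words : List String) (out : String) : Prop := out = result_alt k n words
instance (k : Int) (n : Int) (words : List String) (out : String) : Decidable (Spec_result k n words out) := by unfold Spec_result; infer_instance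

-- ===== CLAIM (what is proved, stated in full; the proofs are below) =====
def Claim_equal_result : Prop := ∀ (k : Int) (n : Int) (words : List String), Dom_result k n words → Pre_result k n words → Spec_result k n words (result k n words)

-- ===== LEMMAS AND PROOFS =====

-- the predicate "w starts with the single character t", as B tests it
def pT (t : Char) (w : String) : Bool := PySem.Str.startswith w (String.ofList [t])

-- the lexicographic key A and B sort by, packed into one linearly ordered value
def lexKey (x : String) : ℤ ×ₗ String := toLex (-(PySem.Str.len x : Int), x)

lemma lexKey_inj : Function.Injective lexKey := by
  intro a b h
  have := congrArg (fun p => (ofLex p).2) h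
  simpa [lexKey] using this

lemma lex_map_ord (xs ys : List Char) :
    List.Lex (·<·) (xs.map (fun c => (c.toNat : Int))) (ys.map (fun c => (c.toNat : Int)))
      ↔ List.Lex (·<·) xs ys := by
  induction xs generalizing ys with
  | nil => cases ys <;> simp
  | cons x xs ih =>
    cases ys with
    | nil => simp
    | cons y ys =>
      simp only [List.map, List.cons_lex_cons_iff, ih]
      constructor
      · rintro (h | ⟨h, hl⟩)
        · exact Or.inl (Char.lt_def.mpr (by exact_mod_cast h))
        · exact Or.inr ⟨Char.ext (UInt32.toNat_inj.mp (by exact_mod_cast h)), hl⟩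
      · rintro (h | ⟨h, hl⟩)
        · exact Or.inl (by exact_mod_cast Char.lt_def.mp h)
        · exact Or.inr ⟨by rw [h], hl⟩

lemma ordK_lt_iff (a b : String) : ordK a < ordK b ↔ a < b := by
  rw [String.lt_iff_toList_lt]
  exact lex_map_ord a.toList b.toList

lemma pT_head (c : Char) (w : String) :
    pT c w = (PySem.Str.pyGet? w 0 == some c) := by
  unfold pT
  rw [PySem.Str.startswith_eq, Bool.eq_iff_iff, PySem.Chars.startswith_iff]
  cases hw : w.toList with
  | nil => simp [PySem.Str.pyGet?, hw, PySem.List.pyGet?]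
  | cons a l =>
    simp [PySem.Str.pyGet?, hw, List.prefix_cons_iff, PySem.List.pyGet?, PySem.List.pyIdx?]
    exact eq_comm

lemma pT_disjoint {t t' : Char} {w : String} (h : pT t w = true) (h' : pT t' w = true) : t = t' := by
  rw [pT_head] at h h'
  simp at h h'
  rw [h] at h'
  exact Option.some_inj.mp h'


lemma sorted2_ordK_eq (xs : List String) :
    PySem.List.sorted2 xs (fun x => -(PySem.Str.len x : Int)) ordK false
      = PySem.List.sorted2 xs (fun x => -(PySem.Str.len x : Int)) (fun w => w) false := by
  unfold PySem.List.sorted2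
  simp only [Bool.false_eq_true, if_false]
  congr 1
  funext acc x
  congr 1
  funext a b
  rw [decide_eq_decide.mpr (ordK_lt_iff a b)]

lemma sorted2_eq_sorted_lexKey (xs : List String) :
    PySem.List.sorted2 xs (fun x => -(PySem.Str.len x : Int)) (fun w => w) false
      = PySem.List.sorted xs lexKey false := by
  unfold PySem.List.sorted2 PySem.List.sorted
  simp only [Bool.false_eq_true, if_false]
  congr 1
  funext acc x
  congr 1
  funext a b
  rw [Bool.eq_iff_iff]
  simp only [Bool.or_eq_true, Bool.and_eq_true, Bool.not_eq_true', decide_eq_true_eq,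
    decide_eq_false_iff_not]
  rw [lexKey, lexKey, Prod.Lex.toLex_lt_toLex]
  constructor
  · rintro (h | ⟨h1, h2⟩)
    · exact Or.inl h
    · rcases lt_trichotomy (-(PySem.Str.len a : Int)) (-(PySem.Str.len b : Int)) with hlt | heq | hgt
      · exact Or.inl hlt
      · exact Or.inr ⟨heq, h2⟩
      · exact absurd hgt h1
  · rintro (h | ⟨h1, h2⟩)
    · exact Or.inl h
    · exact Or.inr ⟨by omega, h2⟩

lemma filter_sorted_lexKey (q : String → Bool) (xs : List String) :
    (PySem.List.sorted xs lexKey false).filter q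
      = PySem.List.sorted (xs.filter q) lexKey false := by
  apply PySem.List.eq_of_perm_of_pairwise_le_of_injective lexKey lexKey_inj
  · exact ((PySem.List.sorted_perm xs lexKey false).filter q).trans
      ((PySem.List.sorted_perm (xs.filter q) lexKey false).symm)
  · exact (PySem.List.sorted_pairwise xs lexKey).filter q
  · exact PySem.List.sorted_pairwise (xs.filter q) lexKey

lemma bScan_none (t : Char) (rest : List String) (h : rest.filter (pT t) = []) :
    bScan t rest = none := by
  induction rest with
  | nil => rfl
  | cons w ws ih =>
    unfold bScan
    cases hp : pT t w with
    | true => simp [hp] at h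
    | false =>
      simp only [List.filter_cons, hp, Bool.false_eq_true, if_false] at h
      have hp' : PySem.Str.startswith w (String.ofList [t]) = false := hp
      rw [hp', ih h]
      simp

lemma bScan_some (t : Char) (rest : List String) (w : String) (ws : List String)
    (h : rest.filter (pT t) = w :: ws) :
    ∃ rest', bScan t rest = some (w, rest') ∧
      ∀ t' : Char, rest'.filter (pT t') = if t' = t then ws else rest.filter (pT t') := by
  induction rest generalizing w ws with
  | nil => simp at h
  | cons x xs ih =>
    unfold bScan
    cases hp : pT t x with
    | true =>
      have hp' : PySem.Str.startswith x (String.ofList [t]) = true := hp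
      rw [List.filter_cons, if_pos hp] at h
      obtain ⟨hxw, hws⟩ := List.cons_eq_cons.mp h
      refine ⟨xs, by rw [hp']; rw [if_pos rfl, hxw], ?_⟩
      intro t'
      by_cases ht : t' = t
      · rw [if_pos ht, ht, hws]
      · rw [if_neg ht, List.filter_cons]
        have : pT t' x = false := by
          cases hq : pT t' x
          · rfl
          · exact absurd (pT_disjoint hp hq) (fun e => ht e.symm)
        rw [this]
        simp
    | false =>
      have hp' : PySem.Str.startswith x (String.ofList [t]) = false := hp
      rw [List.filter_cons, if_neg (by simp [hp])] at h
      obtain ⟨r, hr, hfil⟩ := ih w ws h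
      rw [hp', hr]
      refine ⟨x :: r, by simp, ?_⟩
      intro t'
      by_cases ht : t' = t
      · subst ht
        rw [List.filter_cons, if_neg (by simp [hp]), hfil]
        simp
      · rw [if_neg ht, List.filter_cons, List.filter_cons, hfil t', if_neg ht]

lemma getD_aStep (d : PySem.Dict Char (List String)) (word : String) (c : Char) :
    (aStep d word).getD c []
      = d.getD c [] ++ (if PySem.Str.pyGet? word 0 == some c then [word] else []) := by
  unfold aStep
  cases hg : PySem.Str.pyGet? word 0 with
  | none => simp
  | some ch =>
    simp only
    by_cases hc : d.get? ch = none
    · rw [if_pos hc, PySem.Dict.getD_modify]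
      by_cases hcc : c = ch
      · subst hcc
        rw [if_pos rfl, PySem.Dict.getD_insert, if_pos rfl,
          PySem.Dict.getD_of_get?_eq_none d _ hc]
        simp
      · rw [if_neg hcc, PySem.Dict.getD_insert, if_neg hcc]
        have hf : ((some ch : Option Char) == some c) = false := by
          simpa using fun e => hcc e.symm
        rw [hf]
        simp
    · rw [if_neg hc, PySem.Dict.getD_modify]
      by_cases hcc : c = ch
      · subst hcc; simp
      · rw [if_neg hcc]
        have hf : ((some ch : Option Char) == some c) = false := by
          simpa using fun e => hcc e.symm
        rw [hf]
        simp

lemma getD_aStep_fold (l : List String) (d : PySem.Dict Char (List String)) (c : Char) :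
    (l.foldl aStep d).getD c []
      = d.getD c [] ++ l.filter (fun w => PySem.Str.pyGet? w 0 == some c) := by
  induction l generalizing d with
  | nil => simp
  | cons w l ih =>
    rw [List.foldl_cons, ih, getD_aStep, List.filter_cons]
    by_cases h : (PySem.Str.pyGet? w 0 == some c) = true
    · rw [if_pos h, h]; simp
    · rw [if_neg h, Bool.not_eq_true] at *
      rw [h]; simp

lemma getD_sortFold (g : List String → List String) (L : List Char)
    (d : PySem.Dict Char (List String)) (c : Char) (hL : L.Nodup) :
    ((L.foldl (fun d c => d.modify c [] g) d).getD c [])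
      = if c ∈ L then g (d.getD c []) else d.getD c [] := by
  induction L generalizing d with
  | nil => simp
  | cons a L ih =>
    rw [List.nodup_cons] at hL
    rw [List.foldl_cons, ih _ hL.2, PySem.Dict.getD_modify]
    by_cases hc : c ∈ L
    · have hca : ¬ c = a := fun e => hL.1 (e ▸ hc)
      rw [if_pos hc, if_neg hca, if_pos (List.mem_cons.mpr (Or.inr hc))]
    · by_cases hca : c = a
      · rw [if_neg hc, if_pos hca, if_pos (List.mem_cons.mpr (Or.inl hca)), hca]
      · rw [if_neg hc, if_neg hca, if_neg (by simp [hca, hc])]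

lemma nodup_keys_aStep (d : PySem.Dict Char (List String)) (w : String)
    (h : d.keys.Nodup) : (aStep d w).keys.Nodup := by
  unfold aStep
  cases hg : PySem.Str.pyGet? w 0 with
  | none => exact h
  | some ch =>
    simp only
    have hk : ∀ (d' : PySem.Dict Char (List String)), d'.keys.Nodup →
        (d'.modify ch [] (fun l => l ++ [w])).keys.Nodup := by
      intro d' hd'
      have hkm := PySem.Dict.keys_modify d' ch [] (fun l => l ++ [w])
      have := PySem.Dict.nodup_keys_insert d' ch ((d'.getD ch []) ++ [w]) hd'
      rw [hkm]
      exact this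
    by_cases hc : d.get? ch = none
    · rw [if_pos hc]
      exact hk _ (PySem.Dict.nodup_keys_insert d ch [] h)
    · rw [if_neg hc]
      exact hk d h

lemma nodup_keys_aStep_fold (l : List String) (d : PySem.Dict Char (List String))
    (h : d.keys.Nodup) : (l.foldl aStep d).keys.Nodup := by
  induction l generalizing d with
  | nil => exact h
  | cons w l ih => exact ih _ (nodup_keys_aStep d w h)

-- A's fully built, bucket-sorted dict: bucket c holds the sorted c-headed words
lemma bucket_eq (rest : List String) (c : Char) :
    (((rest.foldl aStep PySem.Dict.empty).keys).foldl
        (fun d c => d.modify c []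
          (fun l => PySem.List.sorted2 l (fun x => -(PySem.Str.len x : Int)) ordK))
        (rest.foldl aStep PySem.Dict.empty)).getD c []
      = PySem.List.sorted2 (rest.filter (pT c)) (fun x => -(PySem.Str.len x : Int)) ordK false := by
  have hnd : (rest.foldl aStep PySem.Dict.empty).keys.Nodup :=
    nodup_keys_aStep_fold rest PySem.Dict.empty PySem.Dict.nodup_keys_empty
  have hget : ∀ c : Char, (rest.foldl aStep PySem.Dict.empty).getD c []
      = rest.filter (fun w => PySem.Str.pyGet? w 0 == some c) := by
    intro c
    rw [getD_aStep_fold, PySem.Dict.getD_empty]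
    simp
  have hfc : rest.filter (fun w => PySem.Str.pyGet? w 0 == some c) = rest.filter (pT c) :=
    List.filter_congr (fun w _ => (pT_head c w).symm)
  rw [getD_sortFold _ _ _ _ hnd]
  by_cases hc : c ∈ (rest.foldl aStep PySem.Dict.empty).keys
  · rw [if_pos hc, hget, hfc]
  · rw [if_neg hc]
    have hcf : (rest.foldl aStep PySem.Dict.empty).contains c = false := by
      cases hb : (rest.foldl aStep PySem.Dict.empty).contains c
      · rfl
      · exact absurd ((PySem.Dict.contains_iff_mem_keys _ c).mp hb) hc
    have h0 : (rest.foldl aStep PySem.Dict.empty).getD c [] = [] :=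
      PySem.Dict.getD_of_not_contains _ _ hcf
    have hfil : rest.filter (pT c) = [] := by rw [← hfc, ← hget c, h0]
    rw [h0, hfil]
    rfl

-- the bridge: A's bucket c = B's sorted pool filtered to c-headed words
lemma inv_init (rest : List String) (c : Char) :
    (((rest.foldl aStep PySem.Dict.empty).keys).foldl
        (fun d c => d.modify c []
          (fun l => PySem.List.sorted2 l (fun x => -(PySem.Str.len x : Int)) ordK))
        (rest.foldl aStep PySem.Dict.empty)).getD c []
      = (PySem.List.sorted2 rest (fun w => -(PySem.Str.len w : Int)) (fun w => w) false).filter (pT c) := by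
  rw [bucket_eq, sorted2_ordK_eq, sorted2_eq_sorted_lexKey, sorted2_eq_sorted_lexKey,
    filter_sorted_lexKey]

lemma loop_eq (fuel : Nat) (d : PySem.Dict Char (List String)) (rest chain : List String)
    (hinv : ∀ t : Char, d.getD t [] = rest.filter (pT t)) :
    aLoop fuel d chain = bLoop fuel rest chain := by
  induction fuel generalizing d rest chain with
  | zero => rfl
  | succ fuel ih =>
    simp only [aLoop, bLoop]
    cases hc : PySem.List.pyGet? chain (-1) with
    | none => rfl
    | some last =>
      dsimp only
      cases hl : PySem.Str.pyGet? last (-1) with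
      | none => rfl
      | some tail =>
        dsimp only
        cases hg : d.get? tail with
        | none =>
          have h0 : rest.filter (pT tail) = [] := by
            rw [← hinv, PySem.Dict.getD_of_get?_eq_none d _ hg]
          rw [bScan_none tail rest h0]
        | some lst =>
          have hD : d.getD tail [] = lst := PySem.Dict.getD_of_get?_eq_some d _ hg
          cases lst with
          | nil =>
            have h0 : rest.filter (pT tail) = [] := by rw [← hinv, hD]
            rw [bScan_none tail rest h0]
          | cons w ws =>
            have hf : rest.filter (pT tail) = w :: ws := by rw [← hinv, hD]
            obtain ⟨rest', hb, hfil⟩ := bScan_some tail rest w ws hf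
            rw [hb]
            exact ih _ _ _ (fun t' => by
              rw [PySem.Dict.getD_insert, hfil t']
              by_cases ht : t' = tail
              · rw [if_pos ht, if_pos ht]
              · rw [if_neg ht, if_neg ht, hinv t'])

-- ===== VERDICT (by name: the statement is the Claim_ definition above) =====
theorem result_spec : Claim_equal_result := by
  intro k n words _ _
  unfold Spec_result result result_alt
  cases hp : PySem.List.pop? words k with
  | none => rfl
  | some sr =>
    obtain ⟨start, rest⟩ := sr
    simp only
    exact loop_eq (rest.length + 1) _ _ [start] (fun t => inv_init rest t)
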